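-- pv_equiv track=rewrite | github.com/vladtp/LFA_Glypho_Interpreter | glypho.py | translateInstruction
-- ===== SOURCE A (Python) =====
-- def translateInstruction(instruction):
-- 	# translate from ASCII chars into instruction opcode
-- 	instr_len = 4
-- 	opcode = [-1] * instr_len
-- 	k = -1
-- 	for i in range(instr_len):
-- 		if opcode[i] == -1:
-- 			k += 1
-- 			opcode[i] = k
-- 			for j in range(i + 1, instr_len):
-- 				if instruction[i] == instruction[j]:
-- 					opcode[j] = k
--
-- 	# map instruction opcode to a decimal value using base 3
-- 	res = 0
-- 	exp = 1
-- 	for x in reversed(opcode):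
-- 		res += x * exp
-- 		exp *= 3
-- 	return res
-- ===== SOURCE B (Python) =====
-- def translateInstruction(instruction):
-- 	# single pass: dict assigns class numbers in first-appearance order; base-3 fold inline
-- 	classes = {}
-- 	res = 0
-- 	for i in range(4):
-- 		c = instruction[i]
-- 		if c not in classes:
-- 			classes[c] = len(classes)
-- 		res = res * 3 + classes[c]
-- 	return res
-- ===== Notes on version B (the rewrite author's own statement) =====
-- stated objective: simpler
-- what changed: A marks equal characters with a quadratic nested scan into an opcode array and then folds it in reverse with an explicit exponent; B makes one pass over the four positions, assigning first-appearance class numbers with a dict and accumulating the base-3 value inline as res = res*3 + code.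
import Mathlib
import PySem

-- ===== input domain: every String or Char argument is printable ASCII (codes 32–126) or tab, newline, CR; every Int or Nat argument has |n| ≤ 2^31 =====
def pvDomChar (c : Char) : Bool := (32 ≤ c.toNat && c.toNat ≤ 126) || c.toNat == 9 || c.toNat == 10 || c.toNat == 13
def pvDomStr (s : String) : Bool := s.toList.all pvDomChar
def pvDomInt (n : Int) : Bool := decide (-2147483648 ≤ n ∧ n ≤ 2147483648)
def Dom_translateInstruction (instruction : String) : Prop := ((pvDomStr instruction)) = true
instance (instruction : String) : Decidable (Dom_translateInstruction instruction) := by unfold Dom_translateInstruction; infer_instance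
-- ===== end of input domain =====

-- B replaces A's nested marking loops and separate reversed base-3 pass with one pass that
-- assigns first-appearance class numbers via a dict and folds the base-3 value inline (objective: simpler).

-- ===== PORT A =====
def translateInstruction (instruction : String) : Int :=
  let instrLen : Int := 4
  -- opcode = [-1] * 4 ; k = -1 ; marking loop with inner scan
  let st := (PySem.List.pyRange 0 instrLen 1).foldl
    (fun (st : List Int × Int) i =>
      let opcode := st.1
      let k := st.2
      if PySem.List.pyGetD opcode i 0 == -1 then
        let k := k + 1
        let opcode := PySem.List.pySetD opcode i k
        let opcode := (PySem.List.pyRange (i + 1) instrLen 1).foldl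
          (fun op j =>
            if PySem.Str.pyGet? instruction i == PySem.Str.pyGet? instruction j then
              PySem.List.pySetD op j k
            else op) opcode
        (opcode, k)
      else st)
    (List.replicate 4 (-1), -1)
  -- res = 0 ; exp = 1 ; for x in reversed(opcode): res += x*exp ; exp *= 3
  let fin := st.1.reverse.foldl (fun (acc : Int × Int) x => (acc.1 + x * acc.2, acc.2 * 3)) (0, 1)
  fin.1

-- ===== PORT B =====
def translateInstruction_alt (instruction : String) : Int :=
  let st := (PySem.List.pyRange 0 4 1).foldl
    (fun (st : PySem.Dict Char Int × Int) i =>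
      match PySem.Str.pyGet? instruction i with
      | none => st           -- Python raises IndexError here; such inputs are excluded by Pre_
      | some c =>
        let classes := if st.1.contains c then st.1 else st.1.insert c (st.1.size : Int)
        (classes, st.2 * 3 + classes.getD c 0))
    (PySem.Dict.empty, 0)
  st.2

-- ===== PRECONDITION & SPEC =====
-- Pre_: Python A (and B) index instruction[0]..instruction[3] and raise IndexError on strings
-- shorter than 4 characters; those inputs are excluded.
def Pre_translateInstruction (instruction : String) : Prop := 4 ≤ instruction.toList.length
instance (instruction : String) : Decidable (Pre_translateInstruction instruction) := by
  unfold Pre_translateInstruction; infer_instance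
def pvWitness_translateInstruction : String := "abab"

def Spec_translateInstruction (instruction : String) (out : Int) : Prop := out = translateInstruction_alt instruction
instance (instruction : String) (out : Int) : Decidable (Spec_translateInstruction instruction out) := by unfold Spec_translateInstruction; infer_instance

-- ===== CLAIM (what is proved, stated in full; the proofs are below) =====
def Claim_equal_translateInstruction : Prop := ∀ (instruction : String), Dom_translateInstruction instruction → Pre_translateInstruction instruction → Spec_translateInstruction instruction (translateInstruction instruction)

-- ===== LEMMAS AND PROOFS =====
theorem pvR0 : PySem.List.pyRange 0 4 1 = [0,1,2,3] := by decide
theorem pvR1 : PySem.List.pyRange 1 4 1 = [1,2,3] := by decide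
theorem pvR2 : PySem.List.pyRange 2 4 1 = [2,3] := by decide
theorem pvR3 : PySem.List.pyRange 3 4 1 = [3] := by decide
theorem pvR4 : PySem.List.pyRange 4 4 1 = [] := by decide
theorem pvR0' : PySem.List.pyRange (0+1) 4 1 = [1,2,3] := by decide
theorem pvR1' : PySem.List.pyRange (1+1) 4 1 = [2,3] := by decide
theorem pvR2' : PySem.List.pyRange (2+1) 4 1 = [3] := by decide
theorem pvR3' : PySem.List.pyRange (3+1) 4 1 = [] := by decide
theorem pvG0 (a b c d : Char) (r : List Char) : PySem.List.pyGet? (a::b::c::d::r) 0 = some a := by simp [pysem]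
theorem pvG1 (a b c d : Char) (r : List Char) : PySem.List.pyGet? (a::b::c::d::r) 1 = some b := by simp [pysem]
theorem pvG2 (a b c d : Char) (r : List Char) : PySem.List.pyGet? (a::b::c::d::r) 2 = some c := by simp [pysem]
theorem pvG3 (a b c d : Char) (r : List Char) : PySem.List.pyGet? (a::b::c::d::r) 3 = some d := by simp [pysem]
theorem pvRep : List.replicate 4 (-1 : Int) = [-1,-1,-1,-1] := rfl
theorem pvS0 (x0 x1 x2 x3 v : Int) : PySem.List.pySetD [x0,x1,x2,x3] 0 v = [v,x1,x2,x3] := by simp [pysem]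
theorem pvS1 (x0 x1 x2 x3 v : Int) : PySem.List.pySetD [x0,x1,x2,x3] 1 v = [x0,v,x2,x3] := by simp [pysem]
theorem pvS2 (x0 x1 x2 x3 v : Int) : PySem.List.pySetD [x0,x1,x2,x3] 2 v = [x0,x1,v,x3] := by simp [pysem]
theorem pvS3 (x0 x1 x2 x3 v : Int) : PySem.List.pySetD [x0,x1,x2,x3] 3 v = [x0,x1,x2,v] := by simp [pysem]
theorem pvD0 (x0 x1 x2 x3 d : Int) : PySem.List.pyGetD [x0,x1,x2,x3] 0 d = x0 := by simp [pysem]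
theorem pvD1 (x0 x1 x2 x3 d : Int) : PySem.List.pyGetD [x0,x1,x2,x3] 1 d = x1 := by simp [pysem]
theorem pvD2 (x0 x1 x2 x3 d : Int) : PySem.List.pyGetD [x0,x1,x2,x3] 2 d = x2 := by simp [pysem]
theorem pvD3 (x0 x1 x2 x3 d : Int) : PySem.List.pyGetD [x0,x1,x2,x3] 3 d = x3 := by simp [pysem]


set_option maxHeartbeats 1000000 in
set_option maxRecDepth 8192 in
theorem key_lemma (s : String) (c0 c1 c2 c3 : Char) (rest : List Char)
    (h : s.toList = c0 :: c1 :: c2 :: c3 :: rest) :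
    translateInstruction s = translateInstruction_alt s := by
  by_cases h1 : c1 = c0
  · by_cases h2 : c2 = c0
    · by_cases h3 : c3 = c0
      · simp [translateInstruction, translateInstruction_alt, h,
      pvR0, pvR1, pvR2, pvR3, pvR4, pvR0', pvR1', pvR2', pvR3',
      pvG0, pvG1, pvG2, pvG3, pvRep, pvS0, pvS1, pvS2, pvS3, pvD0, pvD1, pvD2, pvD3,
      PySem.Dict.getD_insert, PySem.Dict.contains_insert, PySem.Dict.contains_empty,
      PySem.Dict.getD_empty, PySem.Dict.size_insert, PySem.Dict.size_empty, h1, h2, h3]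
      · simp [translateInstruction, translateInstruction_alt, h,
      pvR0, pvR1, pvR2, pvR3, pvR4, pvR0', pvR1', pvR2', pvR3',
      pvG0, pvG1, pvG2, pvG3, pvRep, pvS0, pvS1, pvS2, pvS3, pvD0, pvD1, pvD2, pvD3,
      PySem.Dict.getD_insert, PySem.Dict.contains_insert, PySem.Dict.contains_empty,
      PySem.Dict.getD_empty, PySem.Dict.size_insert, PySem.Dict.size_empty, h1, h2, h3, Ne.symm h3]
    · by_cases h3 : c3 = c0
      · simp [translateInstruction, translateInstruction_alt, h,
      pvR0, pvR1, pvR2, pvR3, pvR4, pvR0', pvR1', pvR2', pvR3',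
      pvG0, pvG1, pvG2, pvG3, pvRep, pvS0, pvS1, pvS2, pvS3, pvD0, pvD1, pvD2, pvD3,
      PySem.Dict.getD_insert, PySem.Dict.contains_insert, PySem.Dict.contains_empty,
      PySem.Dict.getD_empty, PySem.Dict.size_insert, PySem.Dict.size_empty, h1, h3, h2, Ne.symm h2]
      · by_cases h4 : c3 = c2
        · simp [translateInstruction, translateInstruction_alt, h,
      pvR0, pvR1, pvR2, pvR3, pvR4, pvR0', pvR1', pvR2', pvR3',
      pvG0, pvG1, pvG2, pvG3, pvRep, pvS0, pvS1, pvS2, pvS3, pvD0, pvD1, pvD2, pvD3,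
      PySem.Dict.getD_insert, PySem.Dict.contains_insert, PySem.Dict.contains_empty,
      PySem.Dict.getD_empty, PySem.Dict.size_insert, PySem.Dict.size_empty, h1, h4, h2, Ne.symm h2, h3, Ne.symm h3]
        · simp [translateInstruction, translateInstruction_alt, h,
      pvR0, pvR1, pvR2, pvR3, pvR4, pvR0', pvR1', pvR2', pvR3',
      pvG0, pvG1, pvG2, pvG3, pvRep, pvS0, pvS1, pvS2, pvS3, pvD0, pvD1, pvD2, pvD3,
      PySem.Dict.getD_insert, PySem.Dict.contains_insert, PySem.Dict.contains_empty,
      PySem.Dict.getD_empty, PySem.Dict.size_insert, PySem.Dict.size_empty, h1, h2, Ne.symm h2, h3, Ne.symm h3, h4, Ne.symm h4]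
  · by_cases h2 : c2 = c0
    · by_cases h3 : c3 = c0
      · simp [translateInstruction, translateInstruction_alt, h,
      pvR0, pvR1, pvR2, pvR3, pvR4, pvR0', pvR1', pvR2', pvR3',
      pvG0, pvG1, pvG2, pvG3, pvRep, pvS0, pvS1, pvS2, pvS3, pvD0, pvD1, pvD2, pvD3,
      PySem.Dict.getD_insert, PySem.Dict.contains_insert, PySem.Dict.contains_empty,
      PySem.Dict.getD_empty, PySem.Dict.size_insert, PySem.Dict.size_empty, h2, h3, h1, Ne.symm h1]
      · by_cases h4 : c3 = c1
        · simp [translateInstruction, translateInstruction_alt, h,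
      pvR0, pvR1, pvR2, pvR3, pvR4, pvR0', pvR1', pvR2', pvR3',
      pvG0, pvG1, pvG2, pvG3, pvRep, pvS0, pvS1, pvS2, pvS3, pvD0, pvD1, pvD2, pvD3,
      PySem.Dict.getD_insert, PySem.Dict.contains_insert, PySem.Dict.contains_empty,
      PySem.Dict.getD_empty, PySem.Dict.size_insert, PySem.Dict.size_empty, h2, h4, h1, Ne.symm h1, h3, Ne.symm h3]
        · simp [translateInstruction, translateInstruction_alt, h,
      pvR0, pvR1, pvR2, pvR3, pvR4, pvR0', pvR1', pvR2', pvR3',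
      pvG0, pvG1, pvG2, pvG3, pvRep, pvS0, pvS1, pvS2, pvS3, pvD0, pvD1, pvD2, pvD3,
      PySem.Dict.getD_insert, PySem.Dict.contains_insert, PySem.Dict.contains_empty,
      PySem.Dict.getD_empty, PySem.Dict.size_insert, PySem.Dict.size_empty, h2, h1, Ne.symm h1, h3, Ne.symm h3, h4, Ne.symm h4]
    · by_cases h2' : c2 = c1
      · by_cases h3 : c3 = c0
        · simp [translateInstruction, translateInstruction_alt, h,
      pvR0, pvR1, pvR2, pvR3, pvR4, pvR0', pvR1', pvR2', pvR3',
      pvG0, pvG1, pvG2, pvG3, pvRep, pvS0, pvS1, pvS2, pvS3, pvD0, pvD1, pvD2, pvD3,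
      PySem.Dict.getD_insert, PySem.Dict.contains_insert, PySem.Dict.contains_empty,
      PySem.Dict.getD_empty, PySem.Dict.size_insert, PySem.Dict.size_empty, h2', h3, h1, Ne.symm h1, h2, Ne.symm h2]
        · by_cases h4 : c3 = c1
          · simp [translateInstruction, translateInstruction_alt, h,
      pvR0, pvR1, pvR2, pvR3, pvR4, pvR0', pvR1', pvR2', pvR3',
      pvG0, pvG1, pvG2, pvG3, pvRep, pvS0, pvS1, pvS2, pvS3, pvD0, pvD1, pvD2, pvD3,
      PySem.Dict.getD_insert, PySem.Dict.contains_insert, PySem.Dict.contains_empty,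
      PySem.Dict.getD_empty, PySem.Dict.size_insert, PySem.Dict.size_empty, h2', h4, h1, Ne.symm h1, h2, Ne.symm h2, h3, Ne.symm h3]
          · simp [translateInstruction, translateInstruction_alt, h,
      pvR0, pvR1, pvR2, pvR3, pvR4, pvR0', pvR1', pvR2', pvR3',
      pvG0, pvG1, pvG2, pvG3, pvRep, pvS0, pvS1, pvS2, pvS3, pvD0, pvD1, pvD2, pvD3,
      PySem.Dict.getD_insert, PySem.Dict.contains_insert, PySem.Dict.contains_empty,
      PySem.Dict.getD_empty, PySem.Dict.size_insert, PySem.Dict.size_empty, h2', h1, Ne.symm h1, h2, Ne.symm h2, h3, Ne.symm h3, h4, Ne.symm h4]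
      · by_cases h3 : c3 = c0
        · simp [translateInstruction, translateInstruction_alt, h,
      pvR0, pvR1, pvR2, pvR3, pvR4, pvR0', pvR1', pvR2', pvR3',
      pvG0, pvG1, pvG2, pvG3, pvRep, pvS0, pvS1, pvS2, pvS3, pvD0, pvD1, pvD2, pvD3,
      PySem.Dict.getD_insert, PySem.Dict.contains_insert, PySem.Dict.contains_empty,
      PySem.Dict.getD_empty, PySem.Dict.size_insert, PySem.Dict.size_empty, h3, h1, Ne.symm h1, h2, Ne.symm h2, h2', Ne.symm h2']
        · by_cases h4 : c3 = c1
          · simp [translateInstruction, translateInstruction_alt, h,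
      pvR0, pvR1, pvR2, pvR3, pvR4, pvR0', pvR1', pvR2', pvR3',
      pvG0, pvG1, pvG2, pvG3, pvRep, pvS0, pvS1, pvS2, pvS3, pvD0, pvD1, pvD2, pvD3,
      PySem.Dict.getD_insert, PySem.Dict.contains_insert, PySem.Dict.contains_empty,
      PySem.Dict.getD_empty, PySem.Dict.size_insert, PySem.Dict.size_empty, h4, h1, Ne.symm h1, h2, Ne.symm h2, h2', Ne.symm h2', h3, Ne.symm h3]
          · by_cases h5 : c3 = c2
            · simp [translateInstruction, translateInstruction_alt, h,
      pvR0, pvR1, pvR2, pvR3, pvR4, pvR0', pvR1', pvR2', pvR3',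
      pvG0, pvG1, pvG2, pvG3, pvRep, pvS0, pvS1, pvS2, pvS3, pvD0, pvD1, pvD2, pvD3,
      PySem.Dict.getD_insert, PySem.Dict.contains_insert, PySem.Dict.contains_empty,
      PySem.Dict.getD_empty, PySem.Dict.size_insert, PySem.Dict.size_empty, h5, h1, Ne.symm h1, h2, Ne.symm h2, h2', Ne.symm h2', h3, Ne.symm h3, h4, Ne.symm h4]
            · simp [translateInstruction, translateInstruction_alt, h,
      pvR0, pvR1, pvR2, pvR3, pvR4, pvR0', pvR1', pvR2', pvR3',
      pvG0, pvG1, pvG2, pvG3, pvRep, pvS0, pvS1, pvS2, pvS3, pvD0, pvD1, pvD2, pvD3,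
      PySem.Dict.getD_insert, PySem.Dict.contains_insert, PySem.Dict.contains_empty,
      PySem.Dict.getD_empty, PySem.Dict.size_insert, PySem.Dict.size_empty, h1, Ne.symm h1, h2, Ne.symm h2, h2', Ne.symm h2', h3, Ne.symm h3, h4, Ne.symm h4, h5, Ne.symm h5]

-- ===== VERDICT (by name: the statement is the Claim_ definition above) =====
theorem translateInstruction_spec : Claim_equal_translateInstruction := by
  intro s _ hpre
  unfold Spec_translateInstruction
  rcases h : s.toList with _ | ⟨c0, _ | ⟨c1, _ | ⟨c2, _ | ⟨c3, rest⟩⟩⟩⟩ <;>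
    first
    | exact key_lemma s c0 c1 c2 c3 rest h
    | (exfalso; unfold Pre_translateInstruction at hpre; rw [h] at hpre; simp at hpre)
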